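-- pv_equiv track=rewrite | github.com/LatherioK0818/data-structures-and-algorithms | python/code_challenges/array-insert-shift/test_insert.py | insertShiftArray
-- ===== SOURCE A (Python) =====
-- def insertShiftArray(arr, value):
--     middle_index = (len(arr) + 1) // 2
--     new_array = [0] * (len(arr) + 1)
--     for i in range(middle_index):
--         new_array[i] = arr[i]
--     new_array[middle_index] = value
--     for i in range(middle_index, len(arr)):
--         new_array[i + 1] = arr[i]
--     return new_array
-- ===== SOURCE B (Python) =====
-- def insertShiftArray(arr, value):
--     middle_index = (len(arr) + 1) // 2
--     return arr[:middle_index] + [value] + arr[middle_index:]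
-- ===== Notes on version B (the rewrite author's own statement) =====
-- stated objective: simpler
-- what changed: Replaces the pre-allocated zero buffer and the two per-index copy loops with a single concatenation of two slices around the inserted value.
import Mathlib
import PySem

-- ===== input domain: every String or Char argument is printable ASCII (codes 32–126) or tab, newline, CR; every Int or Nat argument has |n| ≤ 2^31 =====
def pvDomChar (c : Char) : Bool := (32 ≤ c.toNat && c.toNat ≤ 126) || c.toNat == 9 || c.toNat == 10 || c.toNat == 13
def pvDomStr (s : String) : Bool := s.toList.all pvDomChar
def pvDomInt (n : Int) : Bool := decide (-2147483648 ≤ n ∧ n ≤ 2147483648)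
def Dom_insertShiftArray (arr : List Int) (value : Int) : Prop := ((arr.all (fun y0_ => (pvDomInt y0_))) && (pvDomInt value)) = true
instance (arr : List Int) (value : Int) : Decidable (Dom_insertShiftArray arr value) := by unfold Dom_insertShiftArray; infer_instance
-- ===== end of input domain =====

-- B builds the result as slice ++ [value] ++ slice instead of A's zero buffer filled by two index loops.

-- ===== PORT A =====
def insertShiftArray (arr : List Int) (value : Int) : List Int :=
  let middle_index : Int := PySem.Int.floordiv ((arr.length : Int) + 1) 2
  let new_array : List Int := List.replicate (arr.length + 1) 0
  let new_array :=
    (PySem.List.pyRange 0 middle_index 1).foldl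
      (fun b i => PySem.List.pySetD b i (PySem.List.pyGetD arr i 0)) new_array
  let new_array := PySem.List.pySetD new_array middle_index value
  let new_array :=
    (PySem.List.pyRange middle_index (arr.length : Int) 1).foldl
      (fun b i => PySem.List.pySetD b (i + 1) (PySem.List.pyGetD arr i 0)) new_array
  new_array

-- ===== PORT B =====
def insertShiftArray_alt (arr : List Int) (value : Int) : List Int :=
  let middle_index : Int := PySem.Int.floordiv ((arr.length : Int) + 1) 2
  PySem.List.slice arr none (some middle_index) ++ [value] ++
    PySem.List.slice arr (some middle_index) none

-- ===== PRECONDITION & SPEC =====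
def Spec_insertShiftArray (arr : List Int) (value : Int) (out : List Int) : Prop := out = insertShiftArray_alt arr value
instance (arr : List Int) (value : Int) (out : List Int) : Decidable (Spec_insertShiftArray arr value out) := by unfold Spec_insertShiftArray; infer_instance

-- ===== CLAIM (what is proved, stated in full; the proofs are below) =====
def Claim_equal_insertShiftArray : Prop := ∀ (arr : List Int) (value : Int), Dom_insertShiftArray arr value → Spec_insertShiftArray arr value (insertShiftArray arr value)

-- ===== LEMMAS AND PROOFS =====

-- First copy loop: writing arr[0..m) into buf yields take/drop split.
theorem loop1_eq (arr : List Int) (m : Nat) (h1 : m ≤ arr.length) :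
    ∀ buf : List Int, m ≤ buf.length →
      (PySem.List.pyRange 0 (m : Int) 1).foldl
        (fun b i => PySem.List.pySetD b i (PySem.List.pyGetD arr i 0)) buf
      = arr.take m ++ buf.drop m := by
  induction m with
  | zero => intro buf _; simp
  | succ k ih =>
    intro buf hb
    have hk : k ≤ arr.length := Nat.le_of_succ_le h1
    have hrng : PySem.List.pyRange 0 ((k + 1 : Nat) : Int) 1
        = PySem.List.pyRange 0 (k : Nat) 1 ++ [(k : Int)] := by
      push_cast
      exact PySem.List.pyRange_one_succ_right (by positivity)
    rw [hrng, List.foldl_append, ih hk buf (Nat.le_of_succ_le hb)]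
    simp only [List.foldl_cons, List.foldl_nil, PySem.List.pySetD_natCast,
      PySem.List.pyGetD_natCast]
    have hlt : k < arr.length := h1
    have hbuflt : k < buf.length := hb
    have hlen : (arr.take k).length = k := by simp [Nat.min_eq_left hk]
    rw [List.set_append_right _ _ (le_of_eq hlen), hlen, Nat.sub_self,
      List.drop_eq_getElem_cons hbuflt, List.set_cons_zero,
      List.getD_eq_getElem?_getD, List.getElem?_eq_getElem hlt]
    have htk : List.take (k + 1) arr = List.take k arr ++ [arr[k]] := by
      rw [List.take_add_one, List.getElem?_eq_getElem hlt]; rfl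
    rw [htk, List.append_assoc, List.singleton_append]
    rfl

-- Second copy loop: writing arr[a..n) at offset +1 keeps buf[0..a] and appends arr.drop a.
theorem loop2_eq (arr : List Int) :
    ∀ (a : Nat) (buf : List Int), a ≤ arr.length → buf.length = arr.length + 1 →
      (PySem.List.pyRange (a : Int) (arr.length : Int) 1).foldl
        (fun b i => PySem.List.pySetD b (i + 1) (PySem.List.pyGetD arr i 0)) buf
      = buf.take (a + 1) ++ arr.drop a := by
  intro a
  induction h : arr.length - a generalizing a with
  | zero =>
    intro buf ha hb
    have : a = arr.length := by omega
    subst this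
    rw [PySem.List.pyRange_one_eq_nil (le_refl _)]
    simp [List.take_of_length_le (by omega : buf.length ≤ arr.length + 1),
      List.drop_of_length_le (le_refl arr.length)]
  | succ k ih =>
    intro buf ha hb
    have halt : a < arr.length := by omega
    rw [PySem.List.pyRange_one_cons (by exact_mod_cast halt)]
    simp only [List.foldl_cons]
    have hcast : ((a : Int) + 1) = ((a + 1 : Nat) : Int) := by push_cast; ring
    rw [hcast, PySem.List.pySetD_natCast, PySem.List.pyGetD_natCast]
    have hlen' : (buf.set (a + 1) (arr.getD a 0)).length = arr.length + 1 := by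
      simp [hb]
    rw [ih (a + 1) (by omega) (buf.set (a + 1) (arr.getD a 0)) (by omega) hlen']
    have hset : (buf.set (a + 1) (arr.getD a 0)).take (a + 2)
        = buf.take (a + 1) ++ [arr.getD a 0] := by
      have hlen : (buf.take (a + 1)).length = a + 1 := by
        simp [Nat.min_eq_left (by omega : a + 1 ≤ buf.length)]
      rw [List.take_set, List.take_add_one,
        List.getElem?_eq_getElem (by omega : a + 1 < buf.length),
        List.set_append_right _ _ (le_of_eq hlen), hlen, Nat.sub_self]
      simp
    rw [hset]
    have hdrop : arr.drop a = arr[a] :: arr.drop (a + 1) := List.drop_eq_getElem_cons halt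
    rw [hdrop]
    simp [List.getD_eq_getElem?_getD, List.getElem?_eq_getElem halt]

theorem mid_natCast (arr : List Int) :
    PySem.Int.floordiv ((arr.length : Int) + 1) 2 = (((arr.length + 1) / 2 : Nat) : Int) := by
  have : ((arr.length : Int) + 1) = ((arr.length + 1 : Nat) : Int) := by push_cast; ring
  rw [this]
  exact_mod_cast PySem.Int.floordiv_natCast (arr.length + 1) 2

-- ===== VERDICT (by name: the statement is the Claim_ definition above) =====
theorem insertShiftArray_spec : Claim_equal_insertShiftArray := by
  intro arr value _
  unfold Spec_insertShiftArray insertShiftArray insertShiftArray_alt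
  simp only [mid_natCast]
  have hmn : (arr.length + 1) / 2 ≤ arr.length := by omega
  rw [PySem.List.slice_to_natCast, PySem.List.slice_from_natCast,
    loop1_eq arr _ hmn (List.replicate (arr.length + 1) 0) (by simp; omega),
    PySem.List.pySetD_natCast]
  have hlen1 : (arr.take ((arr.length + 1) / 2)).length = (arr.length + 1) / 2 := by
    simp [Nat.min_eq_left hmn]
  rw [List.set_append_right _ _ (le_of_eq hlen1), hlen1, Nat.sub_self,
    List.drop_eq_getElem_cons (by simp; omega :
      (arr.length + 1) / 2 < (List.replicate (arr.length + 1) (0 : Int)).length),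
    List.set_cons_zero]
  rw [loop2_eq arr _ _ hmn (by simp [hlen1]; omega)]
  rw [List.take_append, List.take_of_length_le (by rw [hlen1]; omega), hlen1]
  simp
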